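-- pv_equiv track=rewrite | github.com/Sihui233/refactored_dihedral | report.py | inverse_on_cosets
-- ===== SOURCE A (Python) =====
-- from math import gcd
-- from math import gcd, pi, cos, sin
-- from math import gcd, pi, cos, sin
--
-- def inverse_on_cosets(f: int, p: int) -> dict[int, int]:
--     """
--     Returns a dict mapping each coset-index k -> inverse of (f/g) mod (p/g).
--     Even when gcd(f,p)=g>1 this is well-defined, since gcd(f/g, p/g)=1.
--     """
--     f, p = int(f), int(p)
--     g = gcd(f, p)
--     pg = p // g         # size of each coset
--     f_prime = f // g    # the true multiplier inside each coset
--     # sanity-check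
--     if gcd(f_prime, pg) != 1:
--         raise ValueError(f"{f_prime} not invertible mod {pg}")
--     inv = pow(f_prime, -1, pg)
--     # every coset 0..g-1 uses the same inverse
--     return {k: inv for k in range(g)}
-- ===== SOURCE B (Python) =====
-- from math import gcd
--
--
-- def inverse_on_cosets(f: int, p: int) -> dict[int, int]:
--     """Same result as A, but the modular inverse is obtained via Euler's theorem:
--     totient(|p/g|) is computed by trial-division factorization and the inverse is
--     f_prime ** (totient - 1) mod p/g by square-and-multiply (no pow/Euclid)."""
--     f, p = int(f), int(p)
--     g = gcd(f, p)
--     pg = p // g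
--     f_prime = f // g
--     if gcd(f_prime, pg) != 1:
--         raise ValueError(f"{f_prime} not invertible mod {pg}")
--     n = abs(pg)
--     # Euler's totient of n via trial division
--     phi = n
--     m = n
--     d = 2
--     while d * d <= m:
--         if m % d == 0:
--             while m % d == 0:
--                 m //= d
--             phi -= phi // d
--         d += 1
--     if m > 1:
--         phi -= phi // m
--     # inv = f_prime ** (phi - 1) mod pg, by square-and-multiply
--     inv = 1 % pg
--     base = f_prime % pg
--     e = phi - 1
--     while e > 0:
--         if e & 1:
--             inv = inv * base % pg
--         base = base * base % pg
--         e >>= 1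
--     return {k: inv for k in range(g)}
-- ===== Notes on version B (the rewrite author's own statement) =====
-- stated objective: alternative
-- what changed: The modular inverse pow(f_prime, -1, pg) is computed by a completely different number-theoretic route: Euler's totient of |pg| is obtained by trial-division factorization and the inverse is f_prime**(phi-1) mod pg by an explicit square-and-multiply loop (no extended Euclid, no builtin pow).
import Mathlib
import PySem

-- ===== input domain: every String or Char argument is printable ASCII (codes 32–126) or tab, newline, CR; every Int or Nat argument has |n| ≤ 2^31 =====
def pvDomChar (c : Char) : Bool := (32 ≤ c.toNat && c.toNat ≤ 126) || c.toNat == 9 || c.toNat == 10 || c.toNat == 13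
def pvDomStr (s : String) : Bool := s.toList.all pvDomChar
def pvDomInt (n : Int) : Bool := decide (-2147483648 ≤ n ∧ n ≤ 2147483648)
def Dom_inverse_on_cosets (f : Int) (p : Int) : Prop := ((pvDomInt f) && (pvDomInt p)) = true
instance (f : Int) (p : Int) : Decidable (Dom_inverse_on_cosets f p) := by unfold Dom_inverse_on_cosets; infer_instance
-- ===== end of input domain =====

-- B replaces the pow(f_prime, -1, pg) library call by a different number-theoretic
-- route: Euler's totient of |pg| via trial-division factorization, then the inverse
-- as f_prime^(phi-1) mod pg by square-and-multiply; same result wherever A returns (Pre_: p ≠ 0).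

-- ===== PORT A =====
-- pow(x, -1, m): Python's modular inverse; exact for gcd(x, m) = 1 and m ≠ 0
-- (both guaranteed under Pre_): the Bezout coefficient Int.gcdA, normalised by Python's %.
def pyInvMod (x m : Int) : Int := PySem.Int.mod (Int.gcdA x m) m

def inverse_on_cosets (f : Int) (p : Int) : List (Int × Int) :=
  let g : Int := Int.gcd f p
  let pg := PySem.Int.floordiv p g
  let f_prime := PySem.Int.floordiv f g
  if Int.gcd f_prime pg ≠ 1 then []  -- raise ValueError (unreachable under Pre_)
  else
    let inv := pyInvMod f_prime pg
    ((PySem.List.pyRange 0 g 1).foldl (fun d k => d.insert k inv) PySem.Dict.empty).items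

-- ===== PORT B =====
-- inner 'while m % d == 0: m //= d' of Source B (the '2 ≤ d ∧ 0 < m' conjuncts only make
-- the recursion total; they hold at every call reached under Pre_)
def stripFac (m d : Nat) : Nat :=
  if h : m % d = 0 ∧ 2 ≤ d ∧ 0 < m then stripFac (m / d) d else m
termination_by m
decreasing_by exact Nat.div_lt_self h.2.2 (by omega)

theorem stripFac_le (m d : Nat) : stripFac m d ≤ m := by
  fun_induction stripFac m d with
  | case1 m h ih => exact le_trans ih (Nat.div_le_self m d)
  | case2 m h => exact le_refl m

-- outer 'while d * d <= m' loop of Source B; returns the final (phi, m)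
def totLoop (phi m d : Nat) : Nat × Nat :=
  if h : d * d ≤ m ∧ 2 ≤ d then
    if hmod : m % d = 0 then totLoop (phi - phi / d) (stripFac m d) (d + 1)
    else totLoop phi m (d + 1)
  else (phi, m)
termination_by m + 1 - d
decreasing_by
  · have h1 := stripFac_le m d
    have : d ≤ m := le_trans (Nat.le_mul_of_pos_left d (by omega)) h.1
    omega
  · have : d ≤ m := le_trans (Nat.le_mul_of_pos_left d (by omega)) h.1
    omega

-- 'while e > 0' square-and-multiply loop of Source B ('e & 1' = e % 2, 'e >>= 1' = e / 2)
def modpowLoop (inv base : Int) (e : Nat) (pg : Int) : Int :=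
  if he : e = 0 then inv
  else modpowLoop (if e % 2 = 1 then PySem.Int.mod (inv * base) pg else inv)
    (PySem.Int.mod (base * base) pg) (e / 2) pg
termination_by e
decreasing_by exact Nat.div_lt_self (by omega) (by omega)

def inverse_on_cosets_alt (f : Int) (p : Int) : List (Int × Int) :=
  let g : Int := Int.gcd f p
  let pg := PySem.Int.floordiv p g
  let f_prime := PySem.Int.floordiv f g
  if Int.gcd f_prime pg ≠ 1 then []  -- raise ValueError (unreachable under Pre_)
  else
    let n := pg.natAbs
    let r := totLoop n n 2
    let phi := if 1 < r.2 then r.1 - r.1 / r.2 else r.1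
    let inv := modpowLoop (PySem.Int.mod 1 pg) (PySem.Int.mod f_prime pg) (phi - 1) pg
    (PySem.List.pyRange 0 g 1).map (fun k => (k, inv))

-- ===== PRECONDITION & SPEC =====
-- A raises exactly when p = 0 (ZeroDivisionError at p // gcd(0,0), or ValueError
-- from pow with modulus 0); on every other input it returns normally.
def Pre_inverse_on_cosets (f : Int) (p : Int) : Prop := p ≠ 0
instance (f : Int) (p : Int) : Decidable (Pre_inverse_on_cosets f p) := by unfold Pre_inverse_on_cosets; infer_instance
def pvWitness_inverse_on_cosets : Int × Int := (6, 9)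

def Spec_inverse_on_cosets (f : Int) (p : Int) (out : List (Int × Int)) : Prop := out = inverse_on_cosets_alt f p
instance (f : Int) (p : Int) (out : List (Int × Int)) : Decidable (Spec_inverse_on_cosets f p out) := by unfold Spec_inverse_on_cosets; infer_instance

-- ===== CLAIM (what is proved, stated in full; the proofs are below) =====
def Claim_equal_inverse_on_cosets : Prop := ∀ (f : Int) (p : Int), Dom_inverse_on_cosets f p → Pre_inverse_on_cosets f p → Spec_inverse_on_cosets f p (inverse_on_cosets f p)

-- ===== LEMMAS AND PROOFS =====

-- stripFac removes exactly the d-part: positivity, no d left, and m = stripFac * d^e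
theorem stripFac_spec (m d : Nat) : 2 ≤ d → 0 < m →
    0 < stripFac m d ∧ ¬ d ∣ stripFac m d ∧ ∃ e, m = stripFac m d * d ^ e := by
  fun_induction stripFac m d with
  | case1 m h ih =>
      intro hd hm
      have hdm : d ∣ m := Nat.dvd_of_mod_eq_zero h.1
      obtain ⟨h1, h2, e, h3⟩ := ih hd (Nat.div_pos (Nat.le_of_dvd hm hdm) (by omega))
      refine ⟨h1, h2, e + 1, ?_⟩
      have hc := Nat.div_mul_cancel hdm
      rw [pow_succ, ← mul_assoc, ← h3, hc]
  | case2 m h =>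
      intro hd hm
      refine ⟨hm, ?_, 0, by simp⟩
      intro hdvd
      exact h ⟨Nat.dvd_iff_mod_eq_zero.mp hdvd, hd, hm⟩

-- the invariant of Source B's trial-division loop: phi = m * totient(n/m), n/m coprime to m,
-- every prime factor of m is ≥ d; then the final fix-up yields totient n
theorem totLoop_correct (n : Nat) : ∀ (phi m d : Nat), 0 < m → m ∣ n → 2 ≤ d →
    (∀ q, q.Prime → q ∣ m → d ≤ q) →
    Nat.Coprime (n / m) m →
    phi = m * Nat.totient (n / m) →
    (if 1 < (totLoop phi m d).2 then (totLoop phi m d).1 - (totLoop phi m d).1 / (totLoop phi m d).2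
     else (totLoop phi m d).1) = Nat.totient n := by
  intro phi m d
  fun_induction totLoop phi m d with
  | case1 phi m d h hmod ih =>
      intro hm hdvd hd hprimes hcop hphi
      -- d is prime: its least prime factor divides m, hence is ≥ d
      have hddvd : d ∣ m := Nat.dvd_of_mod_eq_zero hmod
      have hdprime : d.Prime := by
        have hne : d ≠ 1 := by omega
        have h1 : d.minFac ∣ m := dvd_trans (Nat.minFac_dvd d) hddvd
        have h2 : d ≤ d.minFac := hprimes _ (Nat.minFac_prime hne) h1
        exact Nat.prime_def_minFac.mpr ⟨hd, le_antisymm (Nat.minFac_le (by omega)) h2⟩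
      obtain ⟨hpos, hnod, e, hfac⟩ := stripFac_spec m d hd hm
      set m' := stripFac m d with hm'
      have he : 1 ≤ e := by
        rcases Nat.eq_zero_or_pos e with h0 | h1
        · rw [h0, pow_zero, mul_one] at hfac; exact absurd (hfac ▸ hddvd) hnod
        · exact h1
      -- primes of m' are ≥ d + 1
      have hprimes' : ∀ q, q.Prime → q ∣ m' → d + 1 ≤ q := by
        intro q hq hqd
        have h1 : q ∣ m := hfac ▸ Dvd.dvd.mul_right hqd _
        have h2 : d ≤ q := hprimes q hq h1
        rcases Nat.lt_or_ge d q with h' | h'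
        · omega
        · exact absurd ((le_antisymm h' h2) ▸ hqd) hnod
      -- n / m' = (n / m) * d ^ e
      have hm'dvd : m' ∣ n := dvd_trans (hfac ▸ Dvd.dvd.mul_right dvd_rfl _) hdvd
      obtain ⟨t, ht⟩ := hdvd
      have hnm : n / m = t := by rw [ht, Nat.mul_div_cancel_left t hm]
      have hquot : n / m' = t * d ^ e := by
        have hr : m' * d ^ e * t = m' * (t * d ^ e) := by ring
        rw [ht, hfac, hr, Nat.mul_div_cancel_left _ hpos]
      -- coprimality pieces
      have hcopt : Nat.Coprime t m := hnm ▸ hcop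
      have hcoptd : Nat.Coprime t d := Nat.Coprime.coprime_dvd_right hddvd hcopt
      have hcopdm' : Nat.Coprime d m' :=
        (Nat.Prime.coprime_iff_not_dvd hdprime).mpr hnod
      have hcop' : Nat.Coprime (n / m') m' := by
        rw [hquot]
        exact Nat.Coprime.mul_left
          (Nat.Coprime.coprime_dvd_right (hfac ▸ Dvd.dvd.mul_right dvd_rfl _) hcopt)
          (Nat.Coprime.pow_left _ hcopdm')
      -- the phi update: phi - phi / d = m' * totient (n / m')
      have hdpow : d ^ e = d ^ (e - 1) * d := by
        conv_lhs => rw [show e = (e - 1) + 1 by omega]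
        rw [pow_succ]
      have hphi' : phi - phi / d = m' * Nat.totient (n / m') := by
        rw [hquot, Nat.totient_mul (Nat.Coprime.pow_right _ hcoptd),
            Nat.totient_prime_pow hdprime he, hphi, hnm, hfac]
        have hq : m' * d ^ e * Nat.totient t / d = m' * d ^ (e - 1) * Nat.totient t := by
          rw [hdpow, show m' * (d ^ (e - 1) * d) * Nat.totient t
                = m' * d ^ (e - 1) * Nat.totient t * d by ring]
          exact Nat.mul_div_cancel _ (by omega)
        rw [hq, hdpow,
            show m' * (d ^ (e - 1) * d) * Nat.totient t
              = m' * d ^ (e - 1) * Nat.totient t * d by ring,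
            show m' * (Nat.totient t * (d ^ (e - 1) * (d - 1)))
              = m' * d ^ (e - 1) * Nat.totient t * (d - 1) by ring,
            Nat.mul_sub, mul_one]
      exact ih hpos hm'dvd (by omega) hprimes' hcop' hphi'
  | case2 phi m d h hmod ih =>
      intro hm hdvd hd hprimes hcop hphi
      have hprimes' : ∀ q, q.Prime → q ∣ m → d + 1 ≤ q := by
        intro q hq hqd
        have h2 : d ≤ q := hprimes q hq hqd
        rcases Nat.lt_or_ge d q with h' | h'
        · omega
        · exact absurd (Nat.dvd_iff_mod_eq_zero.mp ((le_antisymm h' h2) ▸ hqd)) hmod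
      exact ih hm hdvd (by omega) hprimes' hcop hphi
  | case3 phi m d h =>
      intro hm hdvd hd hprimes hcop hphi
      have hdd : m < d * d := lt_of_not_ge (fun hc => absurd (h ⟨hc, hd⟩) (by simp))
      by_cases h1 : 1 < m
      · -- m is prime: its minFac is ≥ d, and composites have minFac² ≤ m < d²
        have hmprime : m.Prime := by
          by_contra hnp
          have hsq := Nat.minFac_sq_le_self hm hnp
          have hge : d ≤ m.minFac := hprimes _ (Nat.minFac_prime (by omega)) (Nat.minFac_dvd m)
          have hmul : d * d ≤ m.minFac * m.minFac := Nat.mul_le_mul hge hge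
          have hsq2 : m.minFac ^ 2 = m.minFac * m.minFac := sq m.minFac
          omega
        simp only [totLoop, dif_neg h]
        rw [if_pos h1]
        obtain ⟨t, ht⟩ := hdvd
        have ht0 : 0 < t := by
          rcases Nat.eq_zero_or_pos t with h0 | h2
          · exfalso
            rw [h0, mul_zero] at ht
            rw [ht] at hcop
            simp [Nat.Coprime] at hcop
            omega
          · exact h2
        have hnm : n / m = t := by rw [ht, Nat.mul_div_cancel_left t hm]
        have hcopt : Nat.Coprime t m := hnm ▸ hcop
        have hdiv : phi / m = Nat.totient t := by
          rw [hphi, hnm, Nat.mul_div_cancel_left _ hm]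
        have htn : Nat.totient n = Nat.totient t * (m - 1) := by
          rw [ht, mul_comm m t, Nat.totient_mul hcopt, Nat.totient_prime hmprime]
        rw [hdiv, hphi, hnm, htn, Nat.mul_sub, mul_one, mul_comm (Nat.totient t) m]
      · have hm1 : m = 1 := by omega
        simp only [totLoop, dif_neg h]
        rw [if_neg (by omega)]
        rw [hphi, hm1, one_mul, Nat.div_one]

-- Python's % is a congruence witness: mod x m ≡ x (mod m)
theorem pymod_modEq (x m : Int) : PySem.Int.mod x m ≡ x [ZMOD m] := by
  rw [Int.modEq_iff_dvd]
  exact ⟨PySem.Int.floordiv x m, by have := PySem.Int.floordiv_mul_add_mod x m; linarith⟩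

-- the square-and-multiply loop computes inv * base^e mod pg
theorem modpowLoop_modEq (pg : Int) : ∀ (inv base : Int) (e : Nat),
    modpowLoop inv base e pg ≡ inv * base ^ e [ZMOD pg] := by
  intro inv base e
  fun_induction modpowLoop inv base e pg with
  | case1 inv base => simp
  | case2 inv base e he ih =>
      refine Int.ModEq.trans ih ?_
      have hbase : PySem.Int.mod (base * base) pg ^ (e / 2) ≡ (base * base) ^ (e / 2) [ZMOD pg] :=
        Int.ModEq.pow _ (pymod_modEq _ _)
      have hsplit : base ^ e = base ^ (e % 2) * (base * base) ^ (e / 2) := by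
        rw [← sq, ← pow_mul, ← pow_add]
        congr 1; omega
      by_cases hpar : e % 2 = 1
      · rw [dif_pos hpar]
        calc PySem.Int.mod (inv * base) pg * PySem.Int.mod (base * base) pg ^ (e / 2)
            ≡ (inv * base) * (base * base) ^ (e / 2) [ZMOD pg] :=
              Int.ModEq.mul (pymod_modEq _ _) hbase
          _ = inv * base ^ e := by rw [hsplit, hpar]; ring
      · rw [dif_neg hpar]
        have hz : e % 2 = 0 := by omega
        calc inv * PySem.Int.mod (base * base) pg ^ (e / 2)
            ≡ inv * (base * base) ^ (e / 2) [ZMOD pg] := Int.ModEq.mul (Int.ModEq.refl _) hbase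
          _ = inv * base ^ e := by rw [hsplit, hz]; ring

-- the loop's result is canonical: it is PySem.Int.mod of something
theorem modpowLoop_canon (pg : Int) : ∀ (inv base : Int) (e : Nat),
    (∃ z, inv = PySem.Int.mod z pg) → ∃ z, modpowLoop inv base e pg = PySem.Int.mod z pg := by
  intro inv base e
  fun_induction modpowLoop inv base e pg with
  | case1 inv base => exact id
  | case2 inv base e he ih =>
      intro hc
      apply ih
      by_cases hpar : e % 2 = 1
      · exact ⟨inv * base, by rw [dif_pos hpar]⟩
      · rw [dif_neg hpar]; exact hc

-- Python's % identifies integers congruent mod a nonzero modulus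
theorem pymod_eq_of_dvd_sub (x y m : Int) (hm : m ≠ 0) (h : m ∣ (x - y)) :
    PySem.Int.mod x m = PySem.Int.mod y m := by
  have hx := PySem.Int.floordiv_mul_add_mod x m
  have hy := PySem.Int.floordiv_mul_add_mod y m
  have hd : m ∣ (PySem.Int.mod x m - PySem.Int.mod y m) := by
    obtain ⟨c, hc⟩ := h
    exact ⟨c - PySem.Int.floordiv x m + PySem.Int.floordiv y m, by linear_combination hc + hx - hy⟩
  have hz : PySem.Int.mod x m - PySem.Int.mod y m = 0 := by
    refine Int.eq_zero_of_dvd_of_natAbs_lt_natAbs hd ?_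
    rcases lt_trichotomy m 0 with hneg | h0 | hpos
    · have b1 := PySem.Int.mod_neg_bounds x hneg
      have b2 := PySem.Int.mod_neg_bounds y hneg
      omega
    · exact absurd h0 hm
    · have b1 := PySem.Int.mod_nonneg x hpos
      have b2 := PySem.Int.mod_lt x hpos
      have b3 := PySem.Int.mod_nonneg y hpos
      have b4 := PySem.Int.mod_lt y hpos
      omega
  omega

-- Euler's theorem over Int with respect to |m|'s totient
theorem euler_int (a m : Int) (hm : m ≠ 0) (h : Int.gcd a m = 1) :
    a ^ Nat.totient m.natAbs ≡ 1 [ZMOD m] := by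
  set n := m.natAbs with hn
  have hn0 : 0 < n := Int.natAbs_pos.mpr hm
  -- reduce the modulus to (n : Int)
  have hmod : ∀ x y : Int, x ≡ y [ZMOD (n : Int)] → x ≡ y [ZMOD m] := by
    intro x y hxy
    rw [Int.modEq_iff_dvd] at hxy ⊢
    exact (Int.natAbs_dvd).mp hxy
  apply hmod
  -- replace a by its nonnegative residue b
  set b := (a % (n : Int)).toNat with hb
  have hbn : ((b : Int)) = a % (n : Int) := by
    rw [hb, Int.toNat_of_nonneg (Int.emod_nonneg a (by exact_mod_cast hn0.ne'))]
  have hab : (b : Int) ≡ a [ZMOD (n : Int)] := hbn ▸ Int.mod_modEq a (n : Int)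
  have hgcdb : Nat.Coprime b n := by
    have h1 : Int.gcd (a % (n : Int)) (n : Int) = Int.gcd a (n : Int) := Int.gcd_emod a (n : Int)
    have h2 : Int.gcd a (n : Int) = Int.gcd a m := by
      unfold Int.gcd; rw [Int.natAbs_natCast]
    have : Int.gcd ((b : Int)) ((n : Int)) = 1 := by rw [hbn, h1, h2, h]
    simpa [Int.gcd, Int.natAbs_natCast] using this
  have heuler : b ^ Nat.totient n ≡ 1 [MOD n] := Nat.ModEq.pow_totient hgcdb
  have : ((b : Int)) ^ Nat.totient n ≡ 1 [ZMOD (n : Int)] := by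
    have := Int.natCast_modEq_iff.mpr heuler
    simpa using this
  exact Int.ModEq.trans (Int.ModEq.pow _ (Int.ModEq.symm hab)) this

-- core: B's Euler-exponentiation result equals A's pyInvMod
theorem inv_agree (a b : Int) (hb : b ≠ 0) (hco : Int.gcd a b = 1) :
    modpowLoop (PySem.Int.mod 1 b) (PySem.Int.mod a b) (Nat.totient b.natAbs - 1) b
      = pyInvMod a b := by
  obtain ⟨z, hz⟩ := modpowLoop_canon b (PySem.Int.mod 1 b) (PySem.Int.mod a b)
      (Nat.totient b.natAbs - 1) ⟨1, rfl⟩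
  set x := modpowLoop (PySem.Int.mod 1 b) (PySem.Int.mod a b) (Nat.totient b.natAbs - 1) b with hx
  have hphi : 0 < Nat.totient b.natAbs := Nat.totient_pos.mpr (Int.natAbs_pos.mpr hb)
  -- x ≡ a ^ (phi - 1)
  have h1 : x ≡ a ^ (Nat.totient b.natAbs - 1) [ZMOD b] := by
    refine Int.ModEq.trans (modpowLoop_modEq b _ _ _) ?_
    calc PySem.Int.mod 1 b * PySem.Int.mod a b ^ (Nat.totient b.natAbs - 1)
        ≡ 1 * a ^ (Nat.totient b.natAbs - 1) [ZMOD b] :=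
          Int.ModEq.mul (pymod_modEq 1 b) (Int.ModEq.pow _ (pymod_modEq a b))
      _ = a ^ (Nat.totient b.natAbs - 1) := one_mul _
  -- a * x ≡ 1 by Euler
  have h2 : a * x ≡ 1 [ZMOD b] := by
    have : a * a ^ (Nat.totient b.natAbs - 1) = a ^ Nat.totient b.natAbs := by
      conv_rhs => rw [show Nat.totient b.natAbs = (Nat.totient b.natAbs - 1) + 1 by omega]
      rw [pow_succ]; ring
    exact Int.ModEq.trans (this ▸ Int.ModEq.mul (Int.ModEq.refl a) h1) (euler_int a b hb hco)
  -- a * pyInvMod ≡ 1 by Bezout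
  have h3 : a * pyInvMod a b ≡ 1 [ZMOD b] := by
    have hA : a * Int.gcdA a b + b * Int.gcdB a b = 1 := by
      have := Int.gcd_eq_gcd_ab a b
      rw [hco] at this
      exact_mod_cast this.symm
    calc a * pyInvMod a b ≡ a * Int.gcdA a b [ZMOD b] :=
          Int.ModEq.mul (Int.ModEq.refl a) (pymod_modEq _ b)
      _ ≡ 1 [ZMOD b] := by
          rw [Int.modEq_iff_dvd]
          exact ⟨Int.gcdB a b, by linarith⟩
  -- b divides a * (x - pyInvMod); coprime ⇒ b ∣ x - pyInvMod
  have hd : b ∣ a * (x - pyInvMod a b) := by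
    have := Int.ModEq.trans h2 (Int.ModEq.symm h3)
    rw [Int.modEq_iff_dvd] at this
    have heq : a * pyInvMod a b - a * x = a * (pyInvMod a b - x) := by ring
    obtain ⟨c, hc⟩ := this
    exact ⟨-c, by linarith⟩
  have hcop : IsCoprime (b : Int) a := by
    rw [Int.isCoprime_iff_gcd_eq_one, Int.gcd_comm]; exact hco
  have hdvd2 : b ∣ (x - pyInvMod a b) := hcop.dvd_of_dvd_mul_left hd
  -- both sides are canonical (PySem.Int.mod of something): equal
  rw [hz]
  apply pymod_eq_of_dvd_sub z (Int.gcdA a b) b hb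
  have hzx : b ∣ (PySem.Int.mod z b - z) := by
    have := pymod_modEq z b
    rw [Int.modEq_iff_dvd] at this
    exact dvd_neg.mp (by simpa [neg_sub] using this)
  have hya : b ∣ (Int.gcdA a b - pyInvMod a b) := by
    have := pymod_modEq (Int.gcdA a b) b
    rw [Int.modEq_iff_dvd] at this
    exact this
  have : z - Int.gcdA a b = (z - PySem.Int.mod z b) + (x - pyInvMod a b) - (Int.gcdA a b - pyInvMod a b) := by
    rw [← hz]; ring
  rw [this]
  exact dvd_sub (dvd_add (dvd_neg.mp (by simpa [neg_sub] using hzx)) hdvd2) hya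

-- ===== VERDICT (by name: the statement is the Claim_ definition above) =====
theorem inverse_on_cosets_spec : Claim_equal_inverse_on_cosets := by
  intro f p _ hp
  unfold Spec_inverse_on_cosets inverse_on_cosets inverse_on_cosets_alt
  have hgpos : 0 < Int.gcd f p := Int.gcd_pos_of_ne_zero_right f hp
  have hg : (0 : Int) < (Int.gcd f p : Int) := by exact_mod_cast hgpos
  have hfp : PySem.Int.floordiv f (Int.gcd f p) = f / (Int.gcd f p : Int) :=
    PySem.Int.floordiv_eq_ediv_of_pos hg
  have hpp : PySem.Int.floordiv p (Int.gcd f p) = p / (Int.gcd f p : Int) :=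
    PySem.Int.floordiv_eq_ediv_of_pos hg
  have hco : Int.gcd (f / (Int.gcd f p : Int)) (p / (Int.gcd f p : Int)) = 1 :=
    Int.gcd_div_gcd_div_gcd hgpos
  have hdvd : (Int.gcd f p : Int) ∣ p := Int.gcd_dvd_right f p
  have hpgne : p / (Int.gcd f p : Int) ≠ 0 := by
    intro h0
    have := Int.ediv_mul_cancel hdvd
    rw [h0] at this
    simp at this
    exact hp this.symm
  simp only [hfp, hpp, hco]
  rw [if_neg (by simp), if_neg (by simp)]
  -- B's totient loop computes Nat.totient of |pg|
  have hn0 : 0 < (p / (Int.gcd f p : Int)).natAbs := Int.natAbs_pos.mpr hpgne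
  set n := (p / (Int.gcd f p : Int)).natAbs with hn
  have htot : (if 1 < (totLoop n n 2).2 then (totLoop n n 2).1 - (totLoop n n 2).1 / (totLoop n n 2).2
      else (totLoop n n 2).1) = Nat.totient n := by
    apply totLoop_correct n n n 2 hn0 dvd_rfl (by omega)
      (fun q hq _ => hq.two_le)
      (by rw [Nat.div_self hn0]; exact Nat.coprime_one_left n)
      (by rw [Nat.div_self hn0, Nat.totient_one, mul_one])
  rw [htot, inv_agree _ _ hpgne hco]
  -- dict built by inserting fresh distinct keys = the mapped list
  rw [PySem.Dict.items_foldl_insert_fresh (PySem.List.pyRange 0 (Int.gcd f p) 1)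
        (fun a => a) (fun _ => pyInvMod (f / (Int.gcd f p : Int)) (p / (Int.gcd f p : Int)))
        PySem.Dict.empty (by intro a _; rfl)
        (by simpa using PySem.List.nodup_pyRange_one 0 (Int.gcd f p))]
  rfl
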